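-- pv_equiv track=rewrite | github.com/blakeC30/league-caddie | fantasy-golf-backend/app/services/playoff.py | generate_draft_order
-- ===== SOURCE A (Python) =====
-- def generate_draft_order(style: str, n: int, picks: int) -> list[int]:
--     """
--     Returns a list of draft_position values (length = n * picks).
--     Each element is the draft_position of the player who picks in that slot.
--     Slot index (0-based) maps to draft_position.
--
--     style: "snake" | "linear" | "top_seed_priority"
--     n: number of players in the pod
--     picks: number of picks per player
--     """
--     if style == "snake":
--         order = []
--         for round_idx in range(picks):
--             positions = list(range(1, n + 1))
--             if round_idx % 2 == 1:
--                 positions = list(reversed(positions))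
--             order.extend(positions)
--         return order
--     elif style == "linear":
--         order = []
--         for _ in range(picks):
--             order.extend(range(1, n + 1))
--         return order
--     elif style == "top_seed_priority":
--         order = []
--         for draft_position in range(1, n + 1):
--             order.extend([draft_position] * picks)
--         return order
--     else:
--         raise ValueError(f"Unknown draft style: {style!r}")
-- ===== SOURCE B (Python) =====
-- def generate_draft_order(style: str, n: int, picks: int) -> list[int]:
--     """Closed-form slot->position mapping: each slot i is computed directly
--     by index arithmetic instead of building per-round sublists."""
--     if style not in ("snake", "linear", "top_seed_priority"):
--         raise ValueError(f"Unknown draft style: {style!r}")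
--     if n <= 0 or picks <= 0:
--         return []
--     if style == "snake":
--         return [i % n + 1 if (i // n) % 2 == 0 else n - i % n for i in range(n * picks)]
--     if style == "linear":
--         return [i % n + 1 for i in range(n * picks)]
--     return [i // picks + 1 for i in range(n * picks)]
-- ===== Notes on version B (the rewrite author's own statement) =====
-- stated objective: alternative
-- what changed: Replaces round-by-round list building (extend of per-round sublists, reversing on odd snake rounds) by a single comprehension over range(n*picks) that computes each slot's position directly by div/mod index arithmetic.
import Mathlib
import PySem

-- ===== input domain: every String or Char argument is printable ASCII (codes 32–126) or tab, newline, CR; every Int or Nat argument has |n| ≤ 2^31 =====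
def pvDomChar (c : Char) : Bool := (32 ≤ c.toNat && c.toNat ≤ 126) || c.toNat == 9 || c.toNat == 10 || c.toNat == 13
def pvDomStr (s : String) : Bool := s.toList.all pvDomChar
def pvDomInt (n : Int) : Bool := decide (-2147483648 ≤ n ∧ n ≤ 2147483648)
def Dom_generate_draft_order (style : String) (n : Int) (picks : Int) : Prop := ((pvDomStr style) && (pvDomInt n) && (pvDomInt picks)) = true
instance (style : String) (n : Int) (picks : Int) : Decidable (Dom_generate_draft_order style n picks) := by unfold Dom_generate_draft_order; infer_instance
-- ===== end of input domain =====

-- B differs from A only in decomposition: closed-form index arithmetic instead of per-round sublists.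
-- Equivalence about the RETURN value; A mutates nothing.

-- ===== PORT A =====
def generate_draft_order (style : String) (n : Int) (picks : Int) : List Int :=
  if style = "snake" then
    (PySem.List.pyRange 0 picks 1).foldl (fun order round_idx =>
      let positions := PySem.List.pyRange 1 (n + 1) 1
      let positions := if PySem.Int.mod round_idx 2 = 1 then positions.reverse else positions
      order ++ positions) []
  else if style = "linear" then
    (PySem.List.pyRange 0 picks 1).foldl (fun order _ =>
      order ++ PySem.List.pyRange 1 (n + 1) 1) []
  else if style = "top_seed_priority" then
    (PySem.List.pyRange 1 (n + 1) 1).foldl (fun order draft_position =>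
      order ++ List.replicate picks.toNat draft_position) []
  else
    []  -- Python raises ValueError here; excluded by Pre_

-- ===== PORT B =====
def generate_draft_order_alt (style : String) (n : Int) (picks : Int) : List Int :=
  if style ≠ "snake" ∧ style ≠ "linear" ∧ style ≠ "top_seed_priority" then
    []  -- Python raises ValueError here; excluded by Pre_
  else if n ≤ 0 ∨ picks ≤ 0 then
    []
  else if style = "snake" then
    (PySem.List.pyRange 0 (n * picks) 1).map (fun i =>
      if PySem.Int.mod (PySem.Int.floordiv i n) 2 = 0 then PySem.Int.mod i n + 1
      else n - PySem.Int.mod i n)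
  else if style = "linear" then
    (PySem.List.pyRange 0 (n * picks) 1).map (fun i => PySem.Int.mod i n + 1)
  else
    (PySem.List.pyRange 0 (n * picks) 1).map (fun i => PySem.Int.floordiv i picks + 1)

-- ===== PRECONDITION & SPEC =====
-- Pre_ excludes exactly the unknown styles, on which A raises ValueError.
def Pre_generate_draft_order (style : String) (n : Int) (picks : Int) : Prop :=
  style = "snake" ∨ style = "linear" ∨ style = "top_seed_priority"
instance (style : String) (n : Int) (picks : Int) : Decidable (Pre_generate_draft_order style n picks) := by
  unfold Pre_generate_draft_order; infer_instance

def pvWitness_generate_draft_order : String × Int × Int := ("snake", 3, 2)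

def Spec_generate_draft_order (style : String) (n : Int) (picks : Int) (out : List Int) : Prop := out = generate_draft_order_alt style n picks
instance (style : String) (n : Int) (picks : Int) (out : List Int) : Decidable (Spec_generate_draft_order style n picks out) := by unfold Spec_generate_draft_order; infer_instance

-- ===== CLAIM (what is proved, stated in full; the proofs are below) =====
def Claim_equal_generate_draft_order : Prop := ∀ (style : String) (n : Int) (picks : Int), Dom_generate_draft_order style n picks → Pre_generate_draft_order style n picks → Spec_generate_draft_order style n picks (generate_draft_order style n picks)

-- ===== LEMMAS AND PROOFS =====

-- Rounds-to-slots lemma: a concatenation of q blocks, the r-th block being the image of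
-- [0,c) under k ↦ f (c*r+k), equals a single map of f over range(c*q).
theorem pv_blocks (c : Int) (hc : 0 < c) (f : Int → Int) :
    ∀ (q : Nat) (g : Nat → List Int),
      (∀ r : Nat, r < q → g r = (List.range c.toNat).map (fun k : Nat => f (c * r + (k : Int)))) →
      (List.range q).flatMap g = (PySem.List.pyRange 0 (c * q) 1).map f := by
  intro q
  induction q with
  | zero =>
    intro g _
    simp [PySem.List.pyRange_one_eq_nil]
  | succ q ih =>
    intro g hg
    have h1 : (List.range (q + 1)).flatMap g = (List.range q).flatMap g ++ g q := by
      rw [List.range_succ, List.flatMap_append]; simp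
    have h2 : PySem.List.pyRange 0 (c * (q + 1 : Nat)) 1
        = PySem.List.pyRange 0 (c * q) 1 ++ PySem.List.pyRange (c * q) (c * (q + 1 : Nat)) 1 := by
      apply PySem.List.pyRange_one_append
      · positivity
      · push_cast; nlinarith
    have h3 : PySem.List.pyRange (c * q) (c * (q + 1 : Nat)) 1
        = (List.range c.toNat).map (fun k : Nat => c * (q : Int) + (k : Int)) := by
      have e : c * ((q + 1 : Nat) : Int) = c * (q : Int) + c := by push_cast; ring
      rw [e, PySem.List.pyRange_one]
      have e2 : (c * (q : Int) + c - c * (q : Int)).toNat = c.toNat := by omega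
      rw [e2]
    rw [h1, h2, List.map_append, ih g (fun r hr => hg r (by omega)), hg q (by omega), h3,
      List.map_map]
    rfl

theorem pv_floordiv_block (c r k : Int) (hc : 0 < c) (hr : 0 ≤ r) (hk0 : 0 ≤ k) (hk : k < c) :
    PySem.Int.floordiv (c * r + k) c = r ∧ PySem.Int.mod (c * r + k) c = k := by
  have hd : PySem.Int.floordiv (c * r + k) c = r := by
    rw [PySem.Int.floordiv_eq_iff_of_pos hc]; constructor <;> nlinarith
  refine ⟨hd, ?_⟩
  have := PySem.Int.floordiv_mul_add_mod (c * r + k) c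
  rw [hd] at this; linarith

-- the increasing block [1..n]
theorem pv_block_up (n : Int) (hn : 0 < n) :
    (List.range n.toNat).map (fun k : Nat => (k : Int) + 1) = PySem.List.pyRange 1 (n + 1) 1 := by
  rw [PySem.List.pyRange_one]
  have : (n + 1 - 1).toNat = n.toNat := by omega
  rw [this]
  exact List.map_congr_left (fun k _ => by omega)

-- the decreasing block [n..1]
theorem pv_block_down (n : Int) (hn : 0 < n) :
    (List.range n.toNat).map (fun k : Nat => n - (k : Int)) = (PySem.List.pyRange 1 (n + 1) 1).reverse := by
  apply List.ext_getElem
  · simp [PySem.List.length_pyRange_one]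
  · intro i h1 h2
    simp only [List.getElem_map, List.getElem_range, List.getElem_reverse]
    rw [PySem.List.getElem_pyRange_one]
    simp [PySem.List.length_pyRange_one] at h1 h2 ⊢
    omega

-- A's loops as flatMaps over List.range
theorem pv_foldl_range (picks : Int) (hp : 0 ≤ picks) (g : Int → List Int) :
    (PySem.List.pyRange 0 picks 1).foldl (fun order r => order ++ g r) []
      = (List.range picks.toNat).flatMap (fun r : Nat => g r) := by
  rw [PySem.List.foldl_append_eq_flatMap, PySem.List.pyRange_one, List.flatMap_map]
  simp

theorem pv_foldl_range_one (n : Int) (hn : 0 ≤ n) (g : Int → List Int) :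
    (PySem.List.pyRange 1 (n + 1) 1).foldl (fun order r => order ++ g r) []
      = (List.range n.toNat).flatMap (fun r : Nat => g ((r : Int) + 1)) := by
  rw [PySem.List.foldl_append_eq_flatMap, PySem.List.pyRange_one, List.flatMap_map]
  have : (n + 1 - 1).toNat = n.toNat := by omega
  rw [this]
  simp only [List.nil_append]
  exact List.flatMap_congr (fun r _ => by norm_num [add_comm])

theorem pv_key_snake (n : Int) (hc : 0 < n) (r k : Nat) (hk : k < n.toNat) :
    (if PySem.Int.mod (PySem.Int.floordiv (n * r + k) n) 2 = 0 then PySem.Int.mod (n * r + k) n + 1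
      else n - PySem.Int.mod (n * r + k) n)
      = (if PySem.Int.mod (r : Int) 2 = 1 then n - (k : Int) else (k : Int) + 1) := by
  obtain ⟨hd, hm⟩ := pv_floordiv_block n r k hc (by positivity) (by positivity) (by omega)
  rw [hd, hm]
  rcases PySem.Int.mod_two_eq (r : Int) with h | h
  · rw [if_pos h, if_neg (by rw [h]; norm_num)]
  · rw [if_neg (by rw [h]; norm_num), if_pos h]

theorem pv_snake_pos (n picks : Int) (hc : 0 < n) (hp : 0 < picks) :
    (PySem.List.pyRange 0 picks 1).foldl (fun order round_idx =>
        let positions := PySem.List.pyRange 1 (n + 1) 1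
        let positions := if PySem.Int.mod round_idx 2 = 1 then positions.reverse else positions
        order ++ positions) []
      = (PySem.List.pyRange 0 (n * picks) 1).map (fun i =>
          if PySem.Int.mod (PySem.Int.floordiv i n) 2 = 0 then PySem.Int.mod i n + 1
          else n - PySem.Int.mod i n) := by
  have h0 : (PySem.List.pyRange 0 picks 1).foldl (fun order round_idx =>
        let positions := PySem.List.pyRange 1 (n + 1) 1
        let positions := if PySem.Int.mod round_idx 2 = 1 then positions.reverse else positions
        order ++ positions) []
      = (PySem.List.pyRange 0 picks 1).foldl (fun order r =>
        order ++ (if PySem.Int.mod r 2 = 1 then (PySem.List.pyRange 1 (n + 1) 1).reverse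
          else PySem.List.pyRange 1 (n + 1) 1)) [] := rfl
  rw [h0, pv_foldl_range picks hp.le]
  rw [pv_blocks n hc _ picks.toNat _ ?hg]
  · have hq : ((picks.toNat : Int)) = picks := by omega
    rw [hq]
  case hg =>
    intro r _
    have := List.map_congr_left (l := List.range n.toNat)
      (f := fun k : Nat => if PySem.Int.mod (PySem.Int.floordiv (n * r + k) n) 2 = 0 then PySem.Int.mod (n * r + k) n + 1 else n - PySem.Int.mod (n * r + k) n)
      (g := fun k : Nat => if PySem.Int.mod (r : Int) 2 = 1 then n - (k : Int) else (k : Int) + 1)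
      (fun k hk => pv_key_snake n hc r k (by simpa using hk))
    rw [this]
    rcases PySem.Int.mod_two_eq (r : Int) with h | h
    · simp only [h]
      norm_num
      exact (pv_block_up n hc).symm
    · simp only [h]
      norm_num
      exact (pv_block_down n hc).symm

theorem pv_linear_pos (n picks : Int) (hc : 0 < n) (hp : 0 < picks) :
    (PySem.List.pyRange 0 picks 1).foldl (fun order _ =>
        order ++ PySem.List.pyRange 1 (n + 1) 1) []
      = (PySem.List.pyRange 0 (n * picks) 1).map (fun i => PySem.Int.mod i n + 1) := by
  rw [pv_foldl_range picks hp.le]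
  rw [pv_blocks n hc _ picks.toNat _ ?hg]
  · have hq : ((picks.toNat : Int)) = picks := by omega
    rw [hq]
  case hg =>
    intro r _
    have := List.map_congr_left (l := List.range n.toNat)
      (f := fun k : Nat => PySem.Int.mod (n * r + k) n + 1)
      (g := fun k : Nat => (k : Int) + 1)
      (fun k hk => by
        obtain ⟨_, hm⟩ := pv_floordiv_block n r k hc (by positivity) (by positivity) (by simpa using hk)
        simp [hm])
    rw [this]
    exact (pv_block_up n hc).symm

theorem pv_top_pos (n picks : Int) (hc : 0 < n) (hp : 0 < picks) :
    (PySem.List.pyRange 1 (n + 1) 1).foldl (fun order draft_position =>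
        order ++ List.replicate picks.toNat draft_position) []
      = (PySem.List.pyRange 0 (n * picks) 1).map (fun i => PySem.Int.floordiv i picks + 1) := by
  rw [pv_foldl_range_one n hc.le]
  rw [pv_blocks picks hp (fun i => PySem.Int.floordiv i picks + 1) n.toNat _ ?hg]
  · have hq : ((n.toNat : Int)) = n := by omega
    rw [hq, mul_comm]
  case hg =>
    intro r _
    have := List.map_congr_left (l := List.range picks.toNat)
      (f := fun k : Nat => PySem.Int.floordiv (picks * r + k) picks + 1)
      (g := fun _ : Nat => (r : Int) + 1)
      (fun k hk => by
        obtain ⟨hd, _⟩ := pv_floordiv_block picks r k hp (by positivity) (by positivity) (by simpa using hk)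
        simp [hd])
    rw [this]
    simp

-- ===== VERDICT (by name: the statement is the Claim_ definition above) =====
theorem generate_draft_order_spec : Claim_equal_generate_draft_order := by
  intro style n picks _ hpre
  unfold Spec_generate_draft_order generate_draft_order generate_draft_order_alt
  by_cases hnp : n ≤ 0 ∨ picks ≤ 0
  · rcases hpre with h | h | h <;> subst h
    · rw [if_pos rfl, if_neg (by decide), if_pos hnp]
      rcases hnp with h | h
      · have hb : PySem.List.pyRange 1 (n + 1) 1 = [] := PySem.List.pyRange_one_eq_nil (by omega)
        simp [hb]
      · have hb : PySem.List.pyRange 0 picks 1 = [] := PySem.List.pyRange_one_eq_nil (by omega)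
        simp [hb]
    · rw [if_neg (by decide), if_pos rfl, if_neg (by decide), if_pos hnp]
      rcases hnp with h | h
      · have hb : PySem.List.pyRange 1 (n + 1) 1 = [] := PySem.List.pyRange_one_eq_nil (by omega)
        simp [hb]
      · have hb : PySem.List.pyRange 0 picks 1 = [] := PySem.List.pyRange_one_eq_nil (by omega)
        simp [hb]
    · rw [if_neg (by decide), if_neg (by decide), if_pos rfl, if_neg (by decide), if_pos hnp]
      rcases hnp with h | h
      · have hb : PySem.List.pyRange 1 (n + 1) 1 = [] := PySem.List.pyRange_one_eq_nil (by omega)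
        simp [hb]
      · have hb : picks.toNat = 0 := by omega
        simp [hb]
  · have hc : 0 < n := by omega
    have hp : 0 < picks := by omega
    rcases hpre with h | h | h <;> subst h
    · rw [if_pos rfl, if_neg (by decide), if_neg hnp, if_pos rfl]
      exact pv_snake_pos n picks hc hp
    · rw [if_neg (by decide), if_pos rfl, if_neg (by decide), if_neg hnp, if_neg (by decide),
        if_pos rfl]
      exact pv_linear_pos n picks hc hp
    · rw [if_neg (by decide), if_neg (by decide), if_pos rfl, if_neg (by decide), if_neg hnp,
        if_neg (by decide), if_neg (by decide)]
      exact pv_top_pos n picks hc hp
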